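-- pv_equiv track=rewrite | github.com/henryhardigan/contact-alignment | mj_score.py | hmm_segments
-- ===== SOURCE A (Python) =====
-- from typing import Dict, Iterable, List, Optional, Set, Tuple
--
-- def hmm_segments(path: List[Optional[str]]) -> List[Tuple[str, int, int]]:
--     """Return (state, start, end) segments using 1-based indices, skipping None."""
--     segs = []
--     cur_state = None
--     cur_start = None
--     for i, st in enumerate(path, start=1):
--         if st is None:
--             if cur_state is not None:
--                 segs.append((cur_state, cur_start, i - 1))
--                 cur_state = None
--                 cur_start = None
--             continue
--         if cur_state is None:
--             cur_state = st
--             cur_start = i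
--         elif st != cur_state:
--             segs.append((cur_state, cur_start, i - 1))
--             cur_state = st
--             cur_start = i
--     if cur_state is not None:
--         segs.append((cur_state, cur_start, len(path)))
--     return segs
-- ===== SOURCE B (Python) =====
-- from itertools import groupby
-- from typing import List, Optional, Tuple
--
-- def hmm_segments(path: List[Optional[str]]) -> List[Tuple[str, int, int]]:
--     """Group path into maximal runs of equal state with itertools.groupby."""
--     segs = []
--     idx = 1
--     for state, grp in groupby(path):
--         length = sum(1 for _ in grp)
--         if state is not None:
--             segs.append((state, idx, idx + length - 1))
--         idx += length
--     return segs
-- ===== Notes on version B (the rewrite author's own statement) =====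
-- stated objective: idiomatic
-- what changed: Replaced the per-element change-detection loop with Optional current-state bookkeeping by itertools.groupby over maximal equal runs, accumulating a running 1-based index and emitting (state, idx, idx+len-1) for non-None runs.
import Mathlib
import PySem

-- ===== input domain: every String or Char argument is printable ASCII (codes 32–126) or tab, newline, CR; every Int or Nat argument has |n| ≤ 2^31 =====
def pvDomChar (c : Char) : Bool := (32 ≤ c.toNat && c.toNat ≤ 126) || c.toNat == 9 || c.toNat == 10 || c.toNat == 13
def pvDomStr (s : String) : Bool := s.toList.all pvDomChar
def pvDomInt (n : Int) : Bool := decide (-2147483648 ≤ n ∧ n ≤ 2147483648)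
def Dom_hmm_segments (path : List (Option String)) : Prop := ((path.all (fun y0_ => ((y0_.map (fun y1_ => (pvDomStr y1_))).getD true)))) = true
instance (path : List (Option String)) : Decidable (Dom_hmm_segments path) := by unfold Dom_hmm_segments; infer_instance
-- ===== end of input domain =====

-- B replaces A's per-element change-detection loop by iteration over maximal equal runs (groupby); same output, idiomatic decomposition.

-- ===== PORT A =====
-- A's for-loop over enumerate(path, start=1): structural recursion carrying the
-- 1-based index i and the loop state (segs, cur), cur = some (cur_state, cur_start).
def hmmLoopA : List (Option String) → Int →
    (List (String × Int × Int)) × Option (String × Int) →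
    (List (String × Int × Int)) × Option (String × Int)
  | [], _, st => st
  | x :: xs, i, (segs, cur) =>
    match x with
    | none =>
      match cur with
      | some (s, start) => hmmLoopA xs (i + 1) (segs ++ [(s, start, i - 1)], none)
      | none => hmmLoopA xs (i + 1) (segs, none)
    | some st' =>
      match cur with
      | none => hmmLoopA xs (i + 1) (segs, some (st', i))
      | some (s, start) =>
        if st' ≠ s then hmmLoopA xs (i + 1) (segs ++ [(s, start, i - 1)], some (st', i))
        else hmmLoopA xs (i + 1) (segs, some (s, start))

def hmm_segments (path : List (Option String)) : List (String × Int × Int) :=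
  let r := hmmLoopA path 1 ([], none)
  match r.2 with
  | none => r.1
  | some (s, start) => r.1 ++ [(s, start, (path.length : Int))]

-- ===== PORT B =====
-- groupby(path): peel the maximal leading run (takeWhile/dropWhile equality), keep a
-- running 1-based index, emit the triple for non-None runs.
def hmmGroupsB : List (Option String) → Int → List (String × Int × Int)
  | [], _ => []
  | x :: xs, idx =>
    let t := xs.takeWhile (· == x)
    let len : Int := 1 + t.length
    let rest := xs.dropWhile (· == x)
    (match x with
     | some s => [(s, idx, idx + len - 1)]
     | none => []) ++ hmmGroupsB rest (idx + len)
  termination_by xs _ => xs.length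
  decreasing_by
    simp only [List.length_cons]
    exact Nat.lt_succ_of_le (List.length_dropWhile_le _ _)

def hmm_segments_alt (path : List (Option String)) : List (String × Int × Int) :=
  hmmGroupsB path 1

-- ===== PRECONDITION & SPEC =====
def Spec_hmm_segments (path : List (Option String)) (out : List (String × Int × Int)) : Prop := out = hmm_segments_alt path
instance (path : List (Option String)) (out : List (String × Int × Int)) : Decidable (Spec_hmm_segments path out) := by unfold Spec_hmm_segments; infer_instance

-- ===== CLAIM (what is proved, stated in full; the proofs are below) =====
def Claim_equal_hmm_segments : Prop := ∀ (path : List (Option String)), Dom_hmm_segments path → Spec_hmm_segments path (hmm_segments path)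

-- ===== LEMMAS AND PROOFS =====

-- A's post-loop finalisation, with n the end index to use (= len(path)).
def hmmFinish (r : (List (String × Int × Int)) × Option (String × Int)) (n : Int) :
    List (String × Int × Int) :=
  match r.2 with
  | none => r.1
  | some (s, start) => r.1 ++ [(s, start, n)]

-- What a mid-loop state of A denotes in terms of B's runs.
def hmmFin (cur : Option (String × Int)) (xs : List (Option String)) (j : Int) :
    List (String × Int × Int) :=
  match cur with
  | none => hmmGroupsB xs j
  | some (s, start) =>
    let t := xs.takeWhile (· == some s)
    (s, start, j + t.length - 1) :: hmmGroupsB (xs.dropWhile (· == some s)) (j + t.length)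

theorem groupsB_none (xs : List (Option String)) (j : Int) :
    hmmGroupsB (none :: xs) j = hmmGroupsB xs (j + 1) := by
  cases xs with
  | nil => simp [hmmGroupsB]
  | cons y ys =>
    by_cases h : y = none
    · subst h
      simp only [hmmGroupsB, List.takeWhile, List.dropWhile]
      norm_num
      congr 1
      ring
    · have hb : (y == (none : Option String)) = false := by
        cases y with
        | none => exact absurd rfl h
        | some s => rfl
      simp [hmmGroupsB, List.takeWhile, List.dropWhile, hb]

theorem groupsB_some (s : String) (xs : List (Option String)) (j : Int) :
    hmmGroupsB (some s :: xs) j =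
      (s, j, j + (xs.takeWhile (· == some s)).length) ::
        hmmGroupsB (xs.dropWhile (· == some s)) (j + 1 + (xs.takeWhile (· == some s)).length) := by
  simp only [hmmGroupsB, List.singleton_append]
  ring_nf

theorem loopA_fin (xs : List (Option String)) :
    ∀ (j : Int) (segs : List (String × Int × Int)) (cur : Option (String × Int)),
      hmmFinish (hmmLoopA xs j (segs, cur)) (j + xs.length - 1) = segs ++ hmmFin cur xs j := by
  induction xs with
  | nil =>
    intro j segs cur
    cases cur with
    | none => simp [hmmLoopA, hmmFinish, hmmFin, hmmGroupsB]
    | some p =>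
      obtain ⟨s, start⟩ := p
      simp [hmmLoopA, hmmFinish, hmmFin, hmmGroupsB]
  | cons x xs ih =>
    intro j segs cur
    have hlen : (j + (x :: xs).length - 1) = ((j + 1) + xs.length - 1) := by
      push_cast [List.length_cons]; ring
    cases cur with
    | none =>
      cases x with
      | none =>
        simp only [hmmLoopA, hlen, ih]
        simp [hmmFin, groupsB_none]
      | some s =>
        simp only [hmmLoopA, hlen, ih]
        simp only [hmmFin, groupsB_some]
        ring_nf
    | some p =>
      obtain ⟨s, start⟩ := p
      cases x with
      | none =>
        simp only [hmmLoopA, hlen, ih]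
        simp only [hmmFin, List.takeWhile, List.dropWhile]
        norm_num [groupsB_none]
      | some s' =>
        by_cases hss : s' = s
        · subst hss
          simp only [hmmLoopA, if_neg (not_not_intro rfl), hlen, ih]
          simp only [hmmFin, List.takeWhile, List.dropWhile, beq_self_eq_true,
            List.length_cons]
          push_cast
          ring_nf
        · have hb : ((some s' : Option String) == some s) = false := by
            simp [hss]
          simp only [hmmLoopA, if_pos (by simpa using hss), hlen, ih]
          simp only [hmmFin, List.takeWhile, List.dropWhile, hb, groupsB_some,
            List.length_nil, List.append_assoc, List.cons_append, List.nil_append]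
          push_cast
          ring_nf

-- ===== VERDICT (by name: the statement is the Claim_ definition above) =====
theorem hmm_segments_spec : Claim_equal_hmm_segments := by
  intro path _
  show hmm_segments path = hmm_segments_alt path
  have h2 : hmm_segments path = hmmFinish (hmmLoopA path 1 ([], none)) ((path.length : Int)) := rfl
  rw [h2, show ((path.length : Int)) = 1 + path.length - 1 from by ring, loopA_fin path 1 [] none]
  simp [hmmFin, hmm_segments_alt]
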